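-- pv_equiv track=rewrite | github.com/Its-MatriX/DBot-Selfbot | Commands/colors.py | gradient_horizontal
-- ===== SOURCE A (Python) =====
-- def foreground_sequence(color):
--         return '\033[38;5;%dm' % color
--
-- def background_sequence(color):
--     return '\033[48;5;%dm' % color
--
-- def get_color(color, mode='fg'):
--     if mode == 'bg':
--         color = background_sequence(color)
--     elif mode == 'fg':
--         color = foreground_sequence(color)
--     else:
--         return None
--
--     return color
--
-- colors_main = [128, 129, 135, 141, 147, 153, 159, 153, 147, 141, 135, 129]
--
-- def gradient_horizontal(string, colors = colors_main):
--     resp = ''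
--     color_index = 0
--     reverse_mode = False
--
--     for letter in string:
--         if reverse_mode == False:
--             color_index += 1
--         else:
--             color_index -= 1
--
--         if color_index == len(colors):
--             reverse_mode = True
--             color_index = len(colors) - 1
--
--         if color_index == -1:
--             reverse_mode = False
--             color_index = 0
--
--         resp += get_color(colors[color_index]) + letter
--
--     return resp
-- ===== SOURCE B (Python) =====
-- colors_main = [128, 129, 135, 141, 147, 153, 159, 153, 147, 141, 135, 129]
--
-- def gradient_horizontal(string, colors = colors_main):
--     # Closed-form triangle wave: the color used for letter i is
--     # colors[min(m, 2*n - 1 - m)] with m = (i + 1) % (2*n), which reproduces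
--     # the bounce with its doubled endpoints without any loop state machine.
--     n = len(colors)
--     pieces = []
--     for i, ch in enumerate(string):
--         m = (i + 1) % (2 * n)
--         pieces.append('\033[38;5;%dm%s' % (colors[min(m, 2 * n - 1 - m)], ch))
--     return ''.join(pieces)
-- ===== Notes on version B (the rewrite author's own statement) =====
-- stated objective: simpler
-- what changed: Replaces A's reverse_mode/color_index state machine with a stateless single pass that computes each letter's color index by the closed-form triangle wave min(m, 2n-1-m), m = (i+1) % (2n).
-- outside the precondition, e.g. on gradient_horizontal('x', []): A raises IndexError, B raises ZeroDivisionError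
import Mathlib
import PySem

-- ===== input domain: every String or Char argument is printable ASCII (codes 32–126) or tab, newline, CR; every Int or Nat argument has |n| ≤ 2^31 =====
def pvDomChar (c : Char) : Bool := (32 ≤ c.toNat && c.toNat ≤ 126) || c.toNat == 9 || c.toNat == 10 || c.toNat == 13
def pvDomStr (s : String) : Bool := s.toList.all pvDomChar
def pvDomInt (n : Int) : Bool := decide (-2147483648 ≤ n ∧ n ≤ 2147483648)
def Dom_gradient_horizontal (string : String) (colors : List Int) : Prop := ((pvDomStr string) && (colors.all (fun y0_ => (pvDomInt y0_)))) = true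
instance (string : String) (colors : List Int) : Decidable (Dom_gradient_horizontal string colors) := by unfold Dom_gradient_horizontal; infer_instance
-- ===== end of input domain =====

-- B replaces A's reverse_mode/color_index state machine by a closed-form triangle-wave
-- index min(m, 2n-1-m), m = (i+1) % (2n), in one stateless pass (objective: simpler).

-- ===== PORT A =====
def foreground_sequence (color : Int) : String :=
  "\x1b[38;5;" ++ PySem.Int.toStr color ++ "m"

def background_sequence (color : Int) : String :=
  "\x1b[48;5;" ++ PySem.Int.toStr color ++ "m"

def get_color (color : Int) (mode : String) : Option String :=
  if mode = "bg" then some (background_sequence color)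
  else if mode = "fg" then some (foreground_sequence color)
  else none

-- A's loop body: state (resp, color_index, reverse_mode);
-- colors[color_index] is PySem.List.pyGetD (always in range when Pre_ holds)
def gh_step (colors : List Int) (st : String × Int × Bool) (letter : Char) : String × Int × Bool :=
  let color_index : Int := if st.2.2 = false then st.2.1 + 1 else st.2.1 - 1
  let p : Bool × Int :=
    if color_index = (colors.length : Int) then (true, (colors.length : Int) - 1)
    else (st.2.2, color_index)
  let q : Bool × Int := if p.2 = -1 then (false, 0) else p
  (st.1 ++ ((get_color (PySem.List.pyGetD colors q.2 0) "fg").getD "") ++ String.ofList [letter],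
   q.2, q.1)

def gradient_horizontal (string : String) (colors : List Int) : String :=
  (string.toList.foldl (gh_step colors) ("", 0, false)).1

-- ===== PORT B =====
-- literal transliteration of Source B: one indexed pass builds the pieces, then ''.join
def gradient_horizontal_alt (string : String) (colors : List Int) : String :=
  let n : Int := colors.length
  let pieces : List String :=
    (PySem.List.enumerate string.toList).map (fun p =>
      let m : Int := PySem.Int.mod (p.1 + 1) (2 * n)
      "\x1b[38;5;" ++ PySem.Int.toStr (PySem.List.pyGetD colors (min m (2 * n - 1 - m)) 0)
        ++ "m" ++ String.ofList [p.2])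
  PySem.Str.join "" pieces

-- ===== PRECONDITION & SPEC =====
-- On colors = [] with a nonempty string A raises IndexError (and B ZeroDivisionError); those inputs are excluded.
def Pre_gradient_horizontal (string : String) (colors : List Int) : Prop :=
  colors ≠ [] ∨ string = ""
instance (string : String) (colors : List Int) : Decidable (Pre_gradient_horizontal string colors) := by
  unfold Pre_gradient_horizontal; infer_instance

def pvWitness_gradient_horizontal : String × List Int := ("ab", [1, 2, 3])

def Spec_gradient_horizontal (string : String) (colors : List Int) (out : String) : Prop := out = gradient_horizontal_alt string colors
instance (string : String) (colors : List Int) (out : String) : Decidable (Spec_gradient_horizontal string colors out) := by unfold Spec_gradient_horizontal; infer_instance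

-- ===== CLAIM (what is proved, stated in full; the proofs are below) =====
def Claim_equal_gradient_horizontal : Prop := ∀ (string : String) (colors : List Int), Dom_gradient_horizontal string colors → Pre_gradient_horizontal string colors → Spec_gradient_horizontal string colors (gradient_horizontal string colors)

-- ===== LEMMAS AND PROOFS =====

-- the color_index A's state machine holds after i letters, in closed form (n = colors.length)
def pvCIdx (n i : Nat) : Int :=
  ((min (i % (2 * n)) (2 * n - 1 - i % (2 * n)) : Nat) : Int)

-- A's reverse_mode after i letters
def pvRIdx (n i : Nat) : Bool := decide (n ≤ i % (2 * n))

-- the piece B emits for the letter ch at position i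
def pvSeg (colors : List Int) (i : Int) (ch : Char) : String :=
  let m : Int := PySem.Int.mod (i + 1) (2 * (colors.length : Int))
  "\x1b[38;5;" ++ PySem.Int.toStr (PySem.List.pyGetD colors (min m (2 * (colors.length : Int) - 1 - m)) 0)
    ++ "m" ++ String.ofList [ch]

theorem pv_join_cons (s : String) (l : List String) :
    PySem.Str.join "" (s :: l) = s ++ PySem.Str.join "" l := by
  apply String.toList_inj.mp
  cases l with
  | nil => simp [PySem.Str.toList_join, PySem.Chars.join_singleton]
  | cons b t => simp [PySem.Str.toList_join, PySem.Chars.join_cons_cons]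

-- B's triangle-wave index at position i IS A's color_index after i+1 letters
theorem pv_idx (n : Nat) (hn : 0 < n) (i : Nat) :
    min (PySem.Int.mod ((i:Int)+1) (2*(n:Int))) (2*(n:Int) - 1 - PySem.Int.mod ((i:Int)+1) (2*(n:Int)))
      = pvCIdx n (i+1) := by
  have h1 : ((i:Int)+1) = (((i+1:Nat)):Int) := by push_cast; ring
  have h2 : (2*(n:Int)) = (((2*n : Nat)):Int) := by push_cast; ring
  rw [h1, h2, PySem.Int.mod_natCast, pvCIdx]
  have := Nat.mod_lt (i+1) (y := 2*n) (by omega)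
  omega

-- A's if-cascade maps the closed-form state at i to the closed-form state at i+1
theorem pv_state (n : Nat) (hn : 0 < n) (i : Nat) :
    (let ci : Int := if (pvRIdx n i) = false then pvCIdx n i + 1 else pvCIdx n i - 1
     let p : Bool × Int := if ci = (n:Int) then (true, (n:Int)-1) else (pvRIdx n i, ci)
     if p.2 = -1 then ((false, 0) : Bool × Int) else p) = (pvRIdx n (i+1), pvCIdx n (i+1)) := by
  have hmlt : i % (2*n) < 2*n := Nat.mod_lt _ (by omega)
  have hm1 : (i+1) % (2*n) = if i % (2*n) + 1 = 2*n then 0 else i % (2*n) + 1 := by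
    rw [Nat.add_mod, Nat.mod_eq_of_lt (a := 1) (by omega)]
    split
    · next h => rw [h, Nat.mod_self]
    · next h => exact Nat.mod_eq_of_lt (by omega)
  obtain ⟨m, hm⟩ : ∃ m, i % (2*n) = m := ⟨_, rfl⟩
  rw [hm] at hmlt hm1
  simp only [pvRIdx, pvCIdx, hm, hm1]
  by_cases hrev : n ≤ m
  · -- reverse mode: current index is 2n-1-m, decrement
    have hmin : min m (2*n - 1 - m) = 2*n - 1 - m := by omega
    simp only [hrev, decide_true, hmin, Bool.true_eq_false, if_false]
    rw [if_neg (show ¬ (((2*n - 1 - m : Nat) : Int) - 1 = (n:Int)) by omega)]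
    by_cases hend : m = 2*n - 1
    · rw [if_pos (show ((true, ((2*n - 1 - m : Nat) : Int) - 1) : Bool × Int).2 = -1 by simp; omega)]
      rw [if_pos (show m + 1 = 2*n by omega)]
      refine Prod.ext ?_ ?_
      · simp; try omega
      · omega
    · rw [if_neg (show ¬ (((true, ((2*n - 1 - m : Nat) : Int) - 1) : Bool × Int).2 = -1) by simp; omega)]
      rw [if_neg (show ¬ (m + 1 = 2*n) by omega)]
      refine Prod.ext ?_ ?_
      · simp; try omega
      · have : min (m+1) (2*n - 1 - (m+1)) = 2*n - 2 - m := by omega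
        simp only [this]; omega
  · -- forward mode: current index is m, increment
    have hmin : min m (2*n - 1 - m) = m := by omega
    simp only [hrev, decide_false, hmin, if_true]
    have h0 : ¬ (m + 1 = 2*n) := by omega
    by_cases htop : m + 1 = n
    · rw [if_pos (show ((m:Int)) + 1 = (n:Int) by omega)]
      rw [if_neg (show ¬ (((true, (n:Int) - 1) : Bool × Int).2 = -1) by simp; omega)]
      rw [if_neg h0]
      refine Prod.ext ?_ ?_
      · simp; try omega
      · have : min (m+1) (2*n - 1 - (m+1)) = n - 1 := by omega
        simp only [this]; omega
    · rw [if_neg (show ¬ (((m:Int)) + 1 = (n:Int)) by omega)]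
      rw [if_neg (show ¬ (((false, (m:Int) + 1) : Bool × Int).2 = -1) by simp; omega)]
      rw [if_neg h0]
      refine Prod.ext ?_ ?_
      · simp; try omega
      · have : min (m+1) (2*n - 1 - (m+1)) = m + 1 := by omega
        simp only [this]; omega

-- one A-step from the closed-form state emits B's piece and lands in the closed-form state at i+1
theorem pv_step (colors : List Int) (hn : 0 < colors.length) (i : Nat) (resp : String) (ch : Char) :
    gh_step colors (resp, pvCIdx colors.length i, pvRIdx colors.length i) ch
      = (resp ++ pvSeg colors (i : Int) ch, pvCIdx colors.length (i+1), pvRIdx colors.length (i+1)) := by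
  have hq := pv_state colors.length hn i
  dsimp only at hq
  unfold gh_step
  dsimp only
  rw [hq]
  have hseg : pvSeg colors (i : Int) ch
      = "\x1b[38;5;" ++ PySem.Int.toStr (PySem.List.pyGetD colors (pvCIdx colors.length (i+1)) 0) ++ "m" ++ String.ofList [ch] := by
    rw [pvSeg, pv_idx colors.length hn i]
  rw [hseg]
  simp [get_color, foreground_sequence, String.append_assoc]

-- the loop invariant: from the closed-form state at i, A's fold appends exactly B's pieces from i on
theorem pv_loop (colors : List Int) (hn : 0 < colors.length) :
    ∀ (l : List Char) (i : Nat) (resp : String),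
      (l.foldl (gh_step colors) (resp, pvCIdx colors.length i, pvRIdx colors.length i)).1
        = resp ++ PySem.Str.join "" ((PySem.List.enumerate l i).map (fun p => pvSeg colors p.1 p.2)) := by
  intro l
  induction l with
  | nil => intro i resp; simp [PySem.List.enumerate_nil, PySem.Str.join]
  | cons c t ih =>
      intro i resp
      rw [PySem.List.enumerate_cons]
      simp only [List.foldl_cons, List.map_cons, pv_join_cons, pv_step colors hn i resp c]
      have := ih (i+1) (resp ++ pvSeg colors (i:Int) c)
      push_cast at this ⊢
      rw [this, String.append_assoc]

-- ===== VERDICT (by name: the statement is the Claim_ definition above) =====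
theorem gradient_horizontal_spec : Claim_equal_gradient_horizontal := by
  intro string colors _ hpre
  unfold Spec_gradient_horizontal
  by_cases hc : colors = []
  · have hs : string = "" := by
      rcases hpre with h | h
      · exact absurd hc h
      · exact h
    subst hc hs
    rfl
  · have hn : 0 < colors.length := by
      cases colors with
      | nil => exact absurd rfl hc
      | cons a t => simp
    have h0 : pvCIdx colors.length 0 = 0 := by
      simp [pvCIdx]
    have hr0 : pvRIdx colors.length 0 = false := by
      simp [pvRIdx]; omega
    unfold gradient_horizontal
    rw [show (("", (0:Int), false) : String × Int × Bool)
          = ("", pvCIdx colors.length 0, pvRIdx colors.length 0) by rw [h0, hr0]]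
    rw [pv_loop colors hn string.toList 0 ""]
    simp only [Nat.cast_zero]
    rw [gradient_horizontal_alt]
    simp only [pvSeg]
    apply String.toList_inj.mp
    simp [PySem.Str.toList_join]
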